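-- pv_equiv track=rewrite | github.com/nobe0716/problem_solving | codeforces/contests/1272/D. Remove One Element.py | solve
-- ===== SOURCE A (Python) =====
-- def solve(n, a):
--     t1 = [1] * n
--     t2 = [1] * n
--
--     for i in range(1, n):
--         if a[i] > a[i - 1]:
--             t1[i] = t1[i - 1] + 1
--
--     for i in range(n - 2, -1, -1):
--         if a[i] < a[i + 1]:
--             t2[i] = t2[i + 1] + 1
--
--     ans = max(max(t1), max(t2))
--
--     for i in range(1, n - 1):
--         if a[i - 1] < a[i + 1]:
--             ans = max(ans, t1[i - 1] + t2[i + 1])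
--
--     return ans
-- ===== SOURCE B (Python) =====
-- def solve(n, a):
--     # One left-to-right pass: no = run ending at i without removal,
--     # rem = best length ending at i with exactly one earlier element removed.
--     ans = 0
--     no_pp = no_prev = rem_prev = 0
--     for i in range(n):
--         no_i = no_prev + 1 if i > 0 and a[i] > a[i - 1] else 1
--         rem_i = 0
--         if i >= 2 and a[i] > a[i - 2]:
--             rem_i = no_pp + 1
--         if i >= 1 and a[i] > a[i - 1] and rem_prev > 0:
--             rem_i = max(rem_i, rem_prev + 1)
--         ans = max(ans, no_i, rem_i)
--         no_pp, no_prev, rem_prev = no_prev, no_i, rem_i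
--     return ans
-- ===== Notes on version B (the rewrite author's own statement) =====
-- stated objective: simpler
-- what changed: Replaced A's two prefix/suffix run-length arrays plus a separate combine pass with a single left-to-right pass keeping two scalars per index (run length ending here without removal, and with exactly one earlier element removed) and a running maximum, using O(1) extra space instead of O(n).
import Mathlib
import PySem

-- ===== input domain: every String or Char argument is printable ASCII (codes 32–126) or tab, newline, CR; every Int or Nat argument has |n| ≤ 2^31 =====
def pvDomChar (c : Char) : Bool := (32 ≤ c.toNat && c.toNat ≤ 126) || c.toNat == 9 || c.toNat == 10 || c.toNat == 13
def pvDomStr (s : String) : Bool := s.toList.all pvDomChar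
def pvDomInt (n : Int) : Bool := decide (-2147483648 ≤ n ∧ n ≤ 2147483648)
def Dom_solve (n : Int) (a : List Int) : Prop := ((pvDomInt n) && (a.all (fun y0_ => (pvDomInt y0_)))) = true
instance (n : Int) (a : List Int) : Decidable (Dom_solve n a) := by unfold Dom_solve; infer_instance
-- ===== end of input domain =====

-- B replaces A's two prefix/suffix arrays and combine pass by a single left-to-right
-- pass with two scalars per index (run length without removal / with one removal);
-- objective: simpler (O(1) extra space, one pass).

-- ===== PORT A =====
def solve (n : Int) (a : List Int) : Int :=
  let t1 := List.replicate n.toNat (1 : Int)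
  let t2 := List.replicate n.toNat (1 : Int)
  let t1 := (PySem.List.pyRange 1 n 1).foldl (fun t1 i =>
      if PySem.List.pyGetD a i 0 > PySem.List.pyGetD a (i - 1) 0 then
        t1.set i.toNat (PySem.List.pyGetD t1 (i - 1) 0 + 1)
      else t1) t1
  let t2 := (PySem.List.pyRange (n - 2) (-1) (-1)).foldl (fun t2 i =>
      if PySem.List.pyGetD a i 0 < PySem.List.pyGetD a (i + 1) 0 then
        t2.set i.toNat (PySem.List.pyGetD t2 (i + 1) 0 + 1)
      else t2) t2
  -- Python max(t1) raises ValueError on the empty list; Pre_solve excludes n ≤ 0, so `.getD 0` is never taken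
  let ans := max ((PySem.List.max? t1 (fun x => x)).getD 0) ((PySem.List.max? t2 (fun x => x)).getD 0)
  (PySem.List.pyRange 1 (n - 1) 1).foldl (fun ans i =>
      if PySem.List.pyGetD a (i - 1) 0 < PySem.List.pyGetD a (i + 1) 0 then
        max ans (PySem.List.pyGetD t1 (i - 1) 0 + PySem.List.pyGetD t2 (i + 1) 0)
      else ans) ans

-- ===== PORT B =====
def solve_alt (n : Int) (a : List Int) : Int :=
  let st := (PySem.List.pyRange 0 n 1).foldl (fun st i =>
      let no_i : Int :=
        if i > 0 ∧ PySem.List.pyGetD a i 0 > PySem.List.pyGetD a (i - 1) 0 then st.2.2.1 + 1 else 1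
      let rem_i : Int := 0
      let rem_i :=
        if i ≥ 2 ∧ PySem.List.pyGetD a i 0 > PySem.List.pyGetD a (i - 2) 0 then st.2.1 + 1 else rem_i
      let rem_i :=
        if i ≥ 1 ∧ PySem.List.pyGetD a i 0 > PySem.List.pyGetD a (i - 1) 0 ∧ st.2.2.2 > 0 then
          max rem_i (st.2.2.2 + 1) else rem_i
      (max (max st.1 no_i) rem_i, st.2.2.1, no_i, rem_i))
    ((0 : Int), (0 : Int), (0 : Int), (0 : Int))
  st.1

-- ===== PRECONDITION & SPEC =====
-- Pre_solve: Python A raises ValueError (max of an empty list) when n ≤ 0 and IndexError when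
-- 2 ≤ n > len(a); it returns on 1 ≤ n ≤ len(a) and (accidental but harmless, matched by B) on n = 1 with any a.
def Pre_solve (n : Int) (a : List Int) : Prop := 1 ≤ n ∧ (n ≤ a.length ∨ n = 1)
instance (n : Int) (a : List Int) : Decidable (Pre_solve n a) := by unfold Pre_solve; infer_instance
def pvWitness_solve : Int × List Int := (4, [3, 1, 2, 4])

def Spec_solve (n : Int) (a : List Int) (out : Int) : Prop := out = solve_alt n a
instance (n : Int) (a : List Int) (out : Int) : Decidable (Spec_solve n a out) := by unfold Spec_solve; infer_instance

-- ===== CLAIM (what is proved, stated in full; the proofs are below) =====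
def Claim_equal_solve : Prop := ∀ (n : Int) (a : List Int), Dom_solve n a → Pre_solve n a → Spec_solve n a (solve n a)


-- ===== LEMMAS AND PROOFS =====

-- Math layer: nat-indexed recurrences for A's arrays and B's scalars.

-- t1f a k = length of the increasing run of a ending at index k (A's t1[k], B's `no`)
def t1f (a : List Int) : Nat → Int
  | 0 => 1
  | k+1 => if a.getD k 0 < a.getD (k+1) 0 then t1f a k + 1 else 1

-- t2r a m j = A's t2[(m-1)-j] (computed from the right, fuel j)
def t2r (a : List Int) (m : Nat) : Nat → Int
  | 0 => 1
  | j+1 => if a.getD (m - 1 - (j+1)) 0 < a.getD (m - 1 - j) 0 then t2r a m j + 1 else 1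

def t2f (a : List Int) (m k : Nat) : Int := t2r a m (m - 1 - k)

-- remf a k = B's `rem` at index k: best run ending at k with exactly one earlier element removed (0 if none)
def remf (a : List Int) : Nat → Int
  | 0 => 0
  | k+1 =>
      max (if 1 ≤ k ∧ a.getD (k-1) 0 < a.getD (k+1) 0 then t1f a (k-1) + 1 else 0)
          (if a.getD k 0 < a.getD (k+1) 0 ∧ remf a k > 0 then remf a k + 1 else 0)

-- ansBf a m = B's answer after processing indices < m
def ansBf (a : List Int) : Nat → Int
  | 0 => 0
  | k+1 => max (max (ansBf a k) (t1f a k)) (remf a k)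

def maxT1 (a : List Int) (m : Nat) : Int :=
  (List.range m).foldl (fun acc k => max acc (t1f a k)) 1

def maxT2 (a : List Int) (m : Nat) : Int :=
  (List.range m).foldl (fun acc k => max acc (t2f a m k)) 1

-- ansAf a m = A's answer (combine pass over the two maxima)
def ansAf (a : List Int) (m : Nat) : Int :=
  (List.range (m-2)).foldl
    (fun acc k => if a.getD k 0 < a.getD (k+2) 0 then max acc (t1f a k + t2f a m (k+2)) else acc)
    (max (maxT1 a m) (maxT2 a m))

-- generic fold-max lemmas
theorem foldl_max_ge_init (f : Nat → Int) (l : List Nat) (init : Int) :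
    init ≤ l.foldl (fun acc k => max acc (f k)) init := by
  induction l generalizing init with
  | nil => exact le_refl _
  | cons x t ih => exact le_trans (le_max_left _ _) (ih _)

theorem foldl_max_ge_mem (f : Nat → Int) (l : List Nat) (init : Int) {k : Nat} (hk : k ∈ l) :
    f k ≤ l.foldl (fun acc k => max acc (f k)) init := by
  induction l generalizing init with
  | nil => cases hk
  | cons x t ih =>
    rcases List.mem_cons.mp hk with h | h
    · subst h; exact le_trans (le_max_right _ _) (foldl_max_ge_init f t _)
    · exact ih _ h

theorem foldl_max_le (f : Nat → Int) (l : List Nat) (init B : Int) (h0 : init ≤ B)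
    (h : ∀ k ∈ l, f k ≤ B) : l.foldl (fun acc k => max acc (f k)) init ≤ B := by
  induction l generalizing init with
  | nil => exact h0
  | cons x t ih =>
    exact ih _ (max_le h0 (h x (List.mem_cons_self))) (fun k hk => h k (List.mem_cons_of_mem _ hk))

theorem foldl_maxif_ge_init (p : Nat → Prop) [DecidablePred p] (f : Nat → Int) (l : List Nat) (init : Int) :
    init ≤ l.foldl (fun acc k => if p k then max acc (f k) else acc) init := by
  induction l generalizing init with
  | nil => exact le_refl _
  | cons x t ih =>
    refine le_trans ?_ (ih (if p x then max init (f x) else init))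
    split <;> simp

theorem foldl_maxif_ge_mem (p : Nat → Prop) [DecidablePred p] (f : Nat → Int) (l : List Nat) (init : Int)
    {k : Nat} (hk : k ∈ l) (hp : p k) :
    f k ≤ l.foldl (fun acc k => if p k then max acc (f k) else acc) init := by
  induction l generalizing init with
  | nil => cases hk
  | cons x t ih =>
    rcases List.mem_cons.mp hk with h | h
    · subst h
      refine le_trans ?_ (foldl_maxif_ge_init p f t _)
      show f k ≤ if p k then max init (f k) else init
      rw [if_pos hp]; exact le_max_right _ _
    · exact ih _ h

theorem foldl_maxif_le (p : Nat → Prop) [DecidablePred p] (f : Nat → Int) (l : List Nat) (init B : Int)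
    (h0 : init ≤ B) (h : ∀ k ∈ l, p k → f k ≤ B) :
    l.foldl (fun acc k => if p k then max acc (f k) else acc) init ≤ B := by
  induction l generalizing init with
  | nil => exact h0
  | cons x t ih =>
    refine ih _ ?_ (fun k hk => h k (List.mem_cons_of_mem _ hk))
    show (if p x then max init (f x) else init) ≤ B
    split
    · exact max_le h0 (h x List.mem_cons_self ‹_›)
    · exact h0

-- basic facts
theorem t1f_pos (a : List Int) (k : Nat) : 1 ≤ t1f a k := by
  induction k with
  | zero => simp [t1f]
  | succ k ih => simp only [t1f]; split <;> omega

theorem t2r_pos (a : List Int) (m j : Nat) : 1 ≤ t2r a m j := by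
  induction j with
  | zero => simp [t2r]
  | succ j ih => simp only [t2r]; split <;> omega

theorem t2f_pos (a : List Int) (m k : Nat) : 1 ≤ t2f a m k := t2r_pos a m _

theorem t2f_succ (a : List Int) (m k : Nat) (h : k + 1 ≤ m - 1) :
    t2f a m k = if a.getD k 0 < a.getD (k+1) 0 then t2f a m (k+1) + 1 else 1 := by
  have h1 : m - 1 - k = (m - 1 - (k+1)) + 1 := by omega
  have h2 : m - 1 - ((m - 1 - (k+1)) + 1) = k := by omega
  have h3 : m - 1 - (m - 1 - (k+1)) = k + 1 := by omega
  unfold t2f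
  rw [h1]
  simp only [t2r, h2, h3]

theorem t2f_last (a : List Int) (m : Nat) : t2f a m (m-1) = 1 := by
  unfold t2f
  rw [Nat.sub_self]
  rfl

-- t1 grows along a run
theorem t1_run (a : List Int) (k : Nat) : ∀ d : Nat,
    (∀ i, k ≤ i → i < k + d → a.getD i 0 < a.getD (i+1) 0) →
    t1f a k + d ≤ t1f a (k + d) := by
  intro d
  induction d with
  | zero => simp
  | succ d ih =>
    intro h
    have hc : a.getD (k+d) 0 < a.getD (k+d+1) 0 := h (k+d) (by omega) (by omega)
    have : t1f a (k + (d+1)) = t1f a (k+d) + 1 := by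
      show t1f a ((k+d)+1) = _
      simp only [t1f, if_pos hc]
    rw [this]
    have := ih (fun i h1 h2 => h i h1 (by omega))
    push_cast
    omega

-- extraction: the run ahead of t2f
theorem t2_extract (a : List Int) (m : Nat) : ∀ d k : Nat, d = m - 1 - k → k ≤ m - 1 →
    ∃ e : Nat, k ≤ e ∧ e ≤ m - 1 ∧ t2f a m k = (e : Int) - k + 1 ∧
      ∀ i, k ≤ i → i < e → a.getD i 0 < a.getD (i+1) 0 := by
  intro d
  induction d with
  | zero =>
    intro k hd hk
    have : k = m - 1 := by omega
    subst this
    exact ⟨m-1, le_refl _, le_refl _, by rw [t2f_last]; ring, fun i h1 h2 => absurd h2 (by omega)⟩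
  | succ d ih =>
    intro k hd hk
    have hk1 : k + 1 ≤ m - 1 := by omega
    rw [t2f_succ a m k hk1]
    by_cases hc : a.getD k 0 < a.getD (k+1) 0
    · obtain ⟨e, he1, he2, hv, hrun⟩ := ih (k+1) (by omega) hk1
      refine ⟨e, by omega, he2, ?_, ?_⟩
      · rw [if_pos hc, hv]; push_cast; ring
      · intro i h1 h2
        rcases Nat.lt_or_ge i (k+1) with h | h
        · have : i = k := by omega
          subst this; exact hc
        · exact hrun i h h2
    · exact ⟨k, le_refl _, hk, by rw [if_neg hc]; ring, fun i h1 h2 => absurd h2 (by omega)⟩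

-- t2 covers any run ahead
theorem t2_run (a : List Int) (m : Nat) : ∀ d k : Nat, k + d ≤ m - 1 →
    (∀ i, k ≤ i → i < k + d → a.getD i 0 < a.getD (i+1) 0) →
    (d : Int) + 1 ≤ t2f a m k := by
  intro d
  induction d with
  | zero => intro k _ _; simpa using t2f_pos a m k
  | succ d ih =>
    intro k hb hrun
    have hc : a.getD k 0 < a.getD (k+1) 0 := hrun k (by omega) (by omega)
    rw [t2f_succ a m k (by omega), if_pos hc]
    have := ih (k+1) (by omega) (fun i h1 h2 => hrun i (by omega) (by omega))
    push_cast
    omega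

-- upper characterisation of remf
theorem remf_upper (a : List Int) (j : Nat) :
    remf a j ≤ 0 ∨ ∃ p : Nat, 1 ≤ p ∧ p + 1 ≤ j ∧ a.getD (p-1) 0 < a.getD (p+1) 0 ∧
      (∀ i, p + 1 ≤ i → i < j → a.getD i 0 < a.getD (i+1) 0) ∧
      remf a j = t1f a (p-1) + (j : Int) - p := by
  induction j with
  | zero => exact Or.inl (le_refl _)
  | succ j ih =>
    by_cases h : remf a (j+1) ≤ 0
    · exact Or.inl h
    right
    simp only [remf] at h ⊢
    rcases max_choice (if 1 ≤ j ∧ a.getD (j-1) 0 < a.getD (j+1) 0 then t1f a (j-1) + 1 else 0)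
        (if a.getD j 0 < a.getD (j+1) 0 ∧ remf a j > 0 then remf a j + 1 else 0) with hm | hm <;>
      rw [hm] at h ⊢
    · -- value came from the fresh-removal branch
      split at h
      · rename_i hg
        refine ⟨j, hg.1, le_refl _, hg.2, fun i h1 h2 => absurd h2 (by omega), ?_⟩
        rw [if_pos hg]
        push_cast; ring
      · omega
    · -- value came from extending a previous rem
      split at h
      · rename_i hg
        rcases ih with h0 | ⟨p, hp1, hp2, hpc, hprun, hpv⟩
        · omega
        refine ⟨p, hp1, by omega, hpc, ?_, ?_⟩
        · intro i h1 h2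
          rcases Nat.lt_succ_iff_lt_or_eq.mp h2 with h' | h'
          · exact hprun i h1 h'
          · subst h'; exact hg.1
        · rw [if_pos hg, hpv]
          push_cast; ring
      · omega

theorem remf_start (a : List Int) (p : Nat) (hp : 1 ≤ p)
    (hc : a.getD (p-1) 0 < a.getD (p+1) 0) : t1f a (p-1) + 1 ≤ remf a (p+1) := by
  simp only [remf]
  refine le_trans ?_ (le_max_left _ _)
  rw [if_pos ⟨hp, hc⟩]

theorem remf_step (a : List Int) (j : Nat) (hc : a.getD j 0 < a.getD (j+1) 0)
    (hpos : 0 < remf a j) : remf a j + 1 ≤ remf a (j+1) := by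
  simp only [remf]
  refine le_trans ?_ (le_max_right _ _)
  rw [if_pos ⟨hc, hpos⟩]

theorem remf_run (a : List Int) (s : Nat) (c : Int) (hcpos : 0 < c) : ∀ d : Nat,
    (∀ i, s ≤ i → i < s + d → a.getD i 0 < a.getD (i+1) 0) →
    c ≤ remf a s → c + d ≤ remf a (s + d) := by
  intro d
  induction d with
  | zero => intro _ h; simpa using h
  | succ d ih =>
    intro hrun hs
    have h1 : c + d ≤ remf a (s + d) := ih (fun i a b => hrun i a (by omega)) hs
    have h2 := remf_step a (s+d) (hrun (s+d) (by omega) (by omega)) (by omega)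
    have : s + (d+1) = (s + d) + 1 := by omega
    rw [this]
    push_cast
    omega

-- ansBf facts
theorem ansBf_mono_succ (a : List Int) (m : Nat) : ansBf a m ≤ ansBf a (m+1) := by
  simp only [ansBf]
  exact le_trans (le_max_left _ _) (le_max_left _ _)

theorem ansBf_ge_t1 (a : List Int) (m k : Nat) (h : k < m) : t1f a k ≤ ansBf a m := by
  induction m with
  | zero => omega
  | succ m ih =>
    rcases Nat.lt_succ_iff_lt_or_eq.mp h with h | h
    · exact le_trans (ih h) (ansBf_mono_succ a m)
    · subst h
      simp only [ansBf]
      exact le_trans (le_max_right _ _) (le_max_left _ _)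

theorem ansBf_ge_rem (a : List Int) (m k : Nat) (h : k < m) : remf a k ≤ ansBf a m := by
  induction m with
  | zero => omega
  | succ m ih =>
    rcases Nat.lt_succ_iff_lt_or_eq.mp h with h | h
    · exact le_trans (ih h) (ansBf_mono_succ a m)
    · subst h
      simp only [ansBf]
      exact le_max_right _ _

theorem ansBf_pos (a : List Int) (m : Nat) (h : 1 ≤ m) : 1 ≤ ansBf a m :=
  le_trans (t1f_pos a 0) (ansBf_ge_t1 a m 0 (by omega))

theorem ansBf_le (a : List Int) (m : Nat) (B : Int) (h0 : 0 ≤ B)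
    (h : ∀ k, k < m → t1f a k ≤ B ∧ remf a k ≤ B) : ansBf a m ≤ B := by
  induction m with
  | zero => exact h0
  | succ m ih =>
    simp only [ansBf]
    have := h m (by omega)
    exact max_le (max_le (ih (fun k hk => h k (by omega))) this.1) this.2

-- the core equality
theorem core (a : List Int) (m : Nat) (hm : 1 ≤ m) : ansAf a m = ansBf a m := by
  have hT1_le : maxT1 a m ≤ ansBf a m := by
    refine foldl_max_le _ _ _ _ (ansBf_pos a m hm) (fun k hk => ?_)
    exact ansBf_ge_t1 a m k (List.mem_range.mp hk)
  have hT2_le : maxT2 a m ≤ ansBf a m := by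
    refine foldl_max_le _ _ _ _ (ansBf_pos a m hm) (fun k hk => ?_)
    have hk' : k < m := List.mem_range.mp hk
    obtain ⟨e, he1, he2, hv, hrun⟩ := t2_extract a m (m-1-k) k rfl (by omega)
    have hrun' : ∀ i, k ≤ i → i < k + (e - k) → a.getD i 0 < a.getD (i+1) 0 := by
      intro i h1 h2; exact hrun i h1 (by omega)
    have h1 := t1_run a k (e - k) hrun'
    have hkek : k + (e - k) = e := by omega
    rw [hkek] at h1
    have h2 := t1f_pos a k
    have h3 : t1f a e ≤ ansBf a m := ansBf_ge_t1 a m e (by omega)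
    have hcast : ((e - k : Nat) : Int) = (e : Int) - k := by omega
    rw [hcast] at h1
    omega
  apply le_antisymm
  · -- ansAf ≤ ansBf
    unfold ansAf
    refine foldl_maxif_le _ _ _ _ _ (max_le hT1_le hT2_le) (fun k hk hg => ?_)
    have hk' : k < m - 2 := List.mem_range.mp hk
    obtain ⟨e, he1, he2, hv, hrun⟩ := t2_extract a m (m-1-(k+2)) (k+2) rfl (by omega)
    have hs := remf_start a (k+1) (by omega) (by simpa using hg)
    have hrun' : ∀ i, k+2 ≤ i → i < (k+2) + (e - (k+2)) → a.getD i 0 < a.getD (i+1) 0 := by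
      intro i h1 h2; exact hrun i h1 (by omega)
    have h1 := remf_run a (k+2) (t1f a k + 1) (by have := t1f_pos a k; omega) (e - (k+2)) hrun'
      (by simpa using hs)
    have hkek : (k+2) + (e - (k+2)) = e := by omega
    rw [hkek] at h1
    have h3 : remf a e ≤ ansBf a m := ansBf_ge_rem a m e (by omega)
    have hcast : ((e - (k+2) : Nat) : Int) = (e : Int) - k - 2 := by omega
    rw [hcast] at h1
    omega
  · -- ansBf ≤ ansAf
    have hinit : max (maxT1 a m) (maxT2 a m) ≤ ansAf a m := foldl_maxif_ge_init _ _ _ _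
    have hT1 : maxT1 a m ≤ ansAf a m := le_trans (le_max_left _ _) hinit
    have h1le : (1 : Int) ≤ maxT1 a m := by
      unfold maxT1; exact foldl_max_ge_init _ _ _
    refine ansBf_le a m _ (by omega) (fun k hkm => ⟨?_, ?_⟩)
    · refine le_trans ?_ hT1
      unfold maxT1
      exact foldl_max_ge_mem _ _ _ (List.mem_range.mpr hkm)
    · rcases remf_upper a k with h0 | ⟨p, hp1, hp2, hpc, hprun, hpv⟩
      · omega
      · have hmem : p - 1 ∈ List.range (m - 2) := List.mem_range.mpr (by omega)
        have hg : a.getD (p-1) 0 < a.getD ((p-1)+2) 0 := by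
          have : (p-1)+2 = p+1 := by omega
          rw [this]; exact hpc
        have hval := foldl_maxif_ge_mem (fun k => a.getD k 0 < a.getD (k+2) 0)
          (fun k => t1f a k + t2f a m (k+2)) (List.range (m-2))
          (max (maxT1 a m) (maxT2 a m)) hmem hg
        have ht2 : (k : Int) - p ≤ t2f a m (p+1) := by
          have := t2_run a m (k - (p+1)) (p+1) (by omega)
            (fun i h1 h2 => hprun i h1 (by omega))
          have hcast : ((k - (p+1) : Nat) : Int) = (k : Int) - p - 1 := by omega
          rw [hcast] at this
          omega
        have hidx : (p-1)+2 = p+1 := by omega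
        have hval2 : t1f a (p-1) + t2f a m (p+1) ≤ ansAf a m := by
          unfold ansAf
          simpa [hidx] using hval
        rw [hpv]
        omega

-- bridges: the ports compute ansAf / ansBf
-- A's two array-building loops as standalone terms
def T1 (n : Int) (a : List Int) : List Int :=
  (PySem.List.pyRange 1 n 1).foldl (fun t1 i =>
      if PySem.List.pyGetD a i 0 > PySem.List.pyGetD a (i - 1) 0 then
        t1.set i.toNat (PySem.List.pyGetD t1 (i - 1) 0 + 1)
      else t1) (List.replicate n.toNat (1 : Int))

def T2 (n : Int) (a : List Int) : List Int :=
  (PySem.List.pyRange (n - 2) (-1) (-1)).foldl (fun t2 i =>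
      if PySem.List.pyGetD a i 0 < PySem.List.pyGetD a (i + 1) 0 then
        t2.set i.toNat (PySem.List.pyGetD t2 (i + 1) 0 + 1)
      else t2) (List.replicate n.toNat (1 : Int))

theorem solve_expand (n : Int) (a : List Int) : solve n a =
    (PySem.List.pyRange 1 (n - 1) 1).foldl (fun ans i =>
        if PySem.List.pyGetD a (i - 1) 0 < PySem.List.pyGetD a (i + 1) 0 then
          max ans (PySem.List.pyGetD (T1 n a) (i - 1) 0 + PySem.List.pyGetD (T2 n a) (i + 1) 0)
        else ans)
      (max ((PySem.List.max? (T1 n a) (fun x => x)).getD 0)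
           ((PySem.List.max? (T2 n a) (fun x => x)).getD 0)) := rfl

theorem set_map_range (f : Nat → Int) (m p : Nat) (v : Int) (_hp : p < m) :
    ((List.range m).map f).set p v = (List.range m).map (fun k => if k = p then v else f k) := by
  refine List.ext_getElem (by simp) (fun i h1 h2 => ?_)
  simp [List.getElem_set, List.getElem_map, List.getElem_range]
  split
  · rename_i h; subst h; rw [if_pos rfl]
  · rename_i h; rw [if_neg (fun hh => h hh.symm)]

theorem T1_eq (a : List Int) (m : Nat) (hm : 1 ≤ m) :
    T1 (m : Int) a = (List.range m).map (fun k => t1f a k) := by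
  have key : ∀ j : Nat, j ≤ m - 1 →
      (PySem.List.pyRange 1 ((j + 1 : Nat) : Int) 1).foldl (fun t1 i =>
          if PySem.List.pyGetD a i 0 > PySem.List.pyGetD a (i - 1) 0 then
            t1.set i.toNat (PySem.List.pyGetD t1 (i - 1) 0 + 1)
          else t1) (List.replicate m (1 : Int))
        = (List.range m).map (fun k => if k ≤ j then t1f a k else 1) := by
    intro j
    induction j with
    | zero =>
      intro _
      rw [show ((0 + 1 : Nat) : Int) = 1 by norm_num, PySem.List.pyRange_one_eq_nil (le_refl 1),
        List.foldl_nil]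
      refine List.ext_getElem (by simp) (fun i h1 h2 => ?_)
      simp only [List.getElem_replicate, List.getElem_map, List.getElem_range]
      cases i with
      | zero => simp [t1f]
      | succ i => rw [if_neg (by omega)]
    | succ j ih =>
      intro hj
      rw [show ((j + 1 + 1 : Nat) : Int) = ((j + 1 : Nat) : Int) + 1 by push_cast; ring,
        PySem.List.pyRange_one_succ_right (by omega), List.foldl_append, ih (by omega),
        List.foldl_cons, List.foldl_nil]
      have e1 : ((j + 1 : Nat) : Int) - 1 = ((j : Nat) : Int) := by push_cast; ring
      rw [e1, PySem.List.pyGetD_natCast a (j+1) 0, PySem.List.pyGetD_natCast a j 0,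
        PySem.List.pyGetD_natCast _ j 0, Int.toNat_natCast,
        PySem.List.getD_map_range _ m j 0 (by omega), if_pos (le_refl j)]
      by_cases hc : a.getD j 0 < a.getD (j+1) 0
      · rw [if_pos (by exact hc), set_map_range _ m (j+1) _ (by omega)]
        refine List.map_congr_left (fun k hk => ?_)
        by_cases hk1 : k = j + 1
        · subst hk1
          rw [if_pos rfl, if_pos (le_refl _)]
          simp only [t1f, if_pos hc]
        · rw [if_neg hk1]
          by_cases hk2 : k ≤ j
          · rw [if_pos hk2, if_pos (by omega)]
          · rw [if_neg hk2, if_neg (by omega)]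
      · rw [if_neg (by exact hc)]
        refine List.map_congr_left (fun k hk => ?_)
        by_cases hk1 : k = j + 1
        · subst hk1
          rw [if_neg (by omega), if_pos (le_refl _)]
          simp only [t1f, if_neg hc]
        · by_cases hk2 : k ≤ j
          · rw [if_pos hk2, if_pos (by omega)]
          · rw [if_neg hk2, if_neg (by omega)]
  have h := key (m-1) (le_refl _)
  rw [show (m-1) + 1 = m by omega] at h
  unfold T1
  rw [Int.toNat_natCast, h]
  refine List.map_congr_left (fun k hk => ?_)
  rw [if_pos (by have := List.mem_range.mp hk; omega)]

theorem T2_eq (a : List Int) (m : Nat) (hm : 1 ≤ m) :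
    T2 (m : Int) a = (List.range m).map (fun k => t2f a m k) := by
  have key : ∀ i : Nat, i ≤ m - 1 →
      (PySem.List.pyRange (((i : Nat) : Int) - 1) (-1) (-1)).foldl (fun t2 i =>
          if PySem.List.pyGetD a i 0 < PySem.List.pyGetD a (i + 1) 0 then
            t2.set i.toNat (PySem.List.pyGetD t2 (i + 1) 0 + 1)
          else t2) ((List.range m).map (fun k => if i ≤ k then t2f a m k else 1))
        = (List.range m).map (fun k => t2f a m k) := by
    intro i
    induction i with
    | zero =>
      intro _
      rw [show ((0 : Nat) : Int) - 1 = -1 by norm_num, PySem.List.pyRange_neg_one_eq_nil (le_refl _)]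
      exact List.map_congr_left (fun k _ => if_pos (by omega))
    | succ i ih =>
      intro hi
      have e1 : ((i + 1 : Nat) : Int) - 1 = ((i : Nat) : Int) := by push_cast; ring
      rw [e1, PySem.List.pyRange_neg_one_cons (by omega), List.foldl_cons]
      have hinner : (if PySem.List.pyGetD a ((i : Nat) : Int) 0 < PySem.List.pyGetD a (((i : Nat) : Int) + 1) 0 then
            ((List.range m).map (fun k => if i + 1 ≤ k then t2f a m k else 1)).set ((i : Nat) : Int).toNat
              (PySem.List.pyGetD ((List.range m).map (fun k => if i + 1 ≤ k then t2f a m k else 1)) (((i : Nat) : Int) + 1) 0 + 1)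
          else ((List.range m).map (fun k => if i + 1 ≤ k then t2f a m k else 1)))
          = (List.range m).map (fun k => if i ≤ k then t2f a m k else 1) := by
        have e2 : ((i : Nat) : Int) + 1 = ((i + 1 : Nat) : Int) := by push_cast; ring
        rw [e2, PySem.List.pyGetD_natCast a i 0, PySem.List.pyGetD_natCast a (i+1) 0,
          PySem.List.pyGetD_natCast _ (i+1) 0, Int.toNat_natCast,
          PySem.List.getD_map_range _ m (i+1) 0 (by omega), if_pos (le_refl (i+1))]
        have ht2 := t2f_succ a m i (by omega)
        by_cases hc : a.getD i 0 < a.getD (i+1) 0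
        · rw [if_pos hc, set_map_range _ m i _ (by omega)]
          refine List.map_congr_left (fun k hk => ?_)
          by_cases hk1 : k = i
          · subst hk1
            rw [if_pos rfl, if_pos (le_refl _), ht2, if_pos hc]
          · rw [if_neg hk1]
            by_cases hk2 : i + 1 ≤ k
            · rw [if_pos hk2, if_pos (by omega)]
            · rw [if_neg hk2, if_neg (by omega)]
        · rw [if_neg hc]
          refine List.map_congr_left (fun k hk => ?_)
          by_cases hk1 : k = i
          · subst hk1
            rw [if_neg (by omega), if_pos (le_refl _), ht2, if_neg hc]
          · by_cases hk2 : i + 1 ≤ k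
            · rw [if_pos hk2, if_pos (by omega)]
            · rw [if_neg hk2, if_neg (by omega)]
      rw [hinner]
      exact ih (by omega)
  have h := key (m-1) (le_refl _)
  unfold T2
  rw [Int.toNat_natCast, show ((m : Nat) : Int) - 2 = (((m - 1 : Nat) : Int)) - 1 by omega]
  have hrep : (List.replicate m (1 : Int)) = (List.range m).map (fun k => if m - 1 ≤ k then t2f a m k else 1) := by
    refine List.ext_getElem (by simp) (fun i h1 h2 => ?_)
    simp only [List.getElem_replicate, List.getElem_map, List.getElem_range]
    simp only [List.length_replicate] at h1
    by_cases hi : m - 1 ≤ i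
    · have : i = m - 1 := by omega
      subst this
      rw [if_pos (le_refl _), t2f_last]
    · rw [if_neg hi]
  rw [hrep]
  exact h

theorem pymax_eq (f : Nat → Int) (m : Nat) (hm : 1 ≤ m) :
    (PySem.List.max? ((List.range m).map f) (fun x => x)).getD 0
      = (List.range m).foldl (fun acc k => max acc (f k)) (f 0) := by
  obtain ⟨m', rfl⟩ : ∃ m', m = m' + 1 := ⟨m - 1, by omega⟩
  rw [List.range_succ_eq_map, List.map_cons, PySem.List.max?_id_cons, Option.getD_some,
    List.foldl_cons, max_self, List.foldl_map, List.foldl_map]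

theorem foldl_max_init_one (f : Nat → Int) (m : Nat) (hm : 1 ≤ m) (hf : ∀ k, k < m → 1 ≤ f k) :
    (List.range m).foldl (fun acc k => max acc (f k)) (f 0)
      = (List.range m).foldl (fun acc k => max acc (f k)) 1 := by
  apply le_antisymm
  · refine foldl_max_le f _ _ _ ?_ (fun k hk => foldl_max_ge_mem f _ _ hk)
    exact foldl_max_ge_mem f _ _ (List.mem_range.mpr (by omega))
  · refine foldl_max_le f _ _ _ ?_ (fun k hk => foldl_max_ge_mem f _ _ hk)
    exact le_trans (hf 0 (by omega)) (foldl_max_ge_mem f _ _ (List.mem_range.mpr (by omega)))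

theorem solve_eq_ansAf (a : List Int) (m : Nat) (hm : 1 ≤ m) : solve (m : Int) a = ansAf a m := by
  rw [solve_expand, T1_eq a m hm, T2_eq a m hm]
  have h1 : (PySem.List.max? ((List.range m).map (fun k => t1f a k)) (fun x => x)).getD 0 = maxT1 a m := by
    rw [pymax_eq _ m hm]
    show (List.range m).foldl (fun acc k => max acc (t1f a k)) (t1f a 0) = _
    rw [show t1f a 0 = 1 from rfl]
    rfl
  have h2 : (PySem.List.max? ((List.range m).map (fun k => t2f a m k)) (fun x => x)).getD 0 = maxT2 a m := by
    rw [pymax_eq _ m hm, foldl_max_init_one _ m hm (fun k _ => t2f_pos a m k)]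
    rfl
  rw [h1, h2]
  unfold ansAf
  rw [show (m : Int) - 1 = ((m - 1 : Nat) : Int) by omega, PySem.List.pyRange_one, List.foldl_map,
    show (((m - 1 : Nat) : Int) - 1).toNat = m - 2 by omega]
  refine PySem.List.foldl_congr_mem _ _ _ _ (fun acc k hk => ?_)
  have hk2 : k < m - 2 := List.mem_range.mp hk
  have e1 : (1 : Int) + (k : Int) - 1 = ((k : Nat) : Int) := by ring
  have e2 : (1 : Int) + (k : Int) + 1 = ((k + 2 : Nat) : Int) := by push_cast; ring
  rw [e1, e2, PySem.List.pyGetD_natCast a k 0, PySem.List.pyGetD_natCast a (k+2) 0,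
    PySem.List.pyGetD_natCast _ k 0, PySem.List.pyGetD_natCast _ (k+2) 0,
    PySem.List.getD_map_range _ m k 0 (by omega), PySem.List.getD_map_range _ m (k+2) 0 (by omega)]



-- B's scalar state after processing indices < m
def ppf (a : List Int) (m : Nat) : Int := if 2 ≤ m then t1f a (m-2) else 0
def pvf (a : List Int) (m : Nat) : Int := if 1 ≤ m then t1f a (m-1) else 0
def rmf (a : List Int) (m : Nat) : Int := if 1 ≤ m then remf a (m-1) else 0

theorem B_inv (a : List Int) (m : Nat) :
    (PySem.List.pyRange 0 (m : Int) 1).foldl (fun st i =>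
      let no_i : Int :=
        if i > 0 ∧ PySem.List.pyGetD a i 0 > PySem.List.pyGetD a (i - 1) 0 then st.2.2.1 + 1 else 1
      let rem_i : Int := 0
      let rem_i :=
        if i ≥ 2 ∧ PySem.List.pyGetD a i 0 > PySem.List.pyGetD a (i - 2) 0 then st.2.1 + 1 else rem_i
      let rem_i :=
        if i ≥ 1 ∧ PySem.List.pyGetD a i 0 > PySem.List.pyGetD a (i - 1) 0 ∧ st.2.2.2 > 0 then
          max rem_i (st.2.2.2 + 1) else rem_i
      (max (max st.1 no_i) rem_i, st.2.2.1, no_i, rem_i))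
    ((0 : Int), (0 : Int), (0 : Int), (0 : Int))
    = (ansBf a m, ppf a m, pvf a m, rmf a m) := by
  induction m with
  | zero =>
    rw [show ((0:Nat) : Int) = 0 by norm_num, PySem.List.pyRange_one_eq_nil (le_refl 0)]
    simp [ansBf, ppf, pvf, rmf]
  | succ m ih =>
    rw [show ((m+1 : Nat) : Int) = (m : Int) + 1 by push_cast; ring,
      PySem.List.pyRange_one_succ_right (by positivity), List.foldl_append, ih]
    simp only [List.foldl_cons, List.foldl_nil]
    show (let no_i : Int :=
        if (m:Int) > 0 ∧ PySem.List.pyGetD a (m:Int) 0 > PySem.List.pyGetD a ((m:Int) - 1) 0 then pvf a m + 1 else 1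
      let rem_i : Int := 0
      let rem_i :=
        if (m:Int) ≥ 2 ∧ PySem.List.pyGetD a (m:Int) 0 > PySem.List.pyGetD a ((m:Int) - 2) 0 then ppf a m + 1 else rem_i
      let rem_i :=
        if (m:Int) ≥ 1 ∧ PySem.List.pyGetD a (m:Int) 0 > PySem.List.pyGetD a ((m:Int) - 1) 0 ∧ rmf a m > 0 then
          max rem_i (rmf a m + 1) else rem_i
      (max (max (ansBf a m) no_i) rem_i, pvf a m, no_i, rem_i))
      = (ansBf a (m+1), ppf a (m+1), pvf a (m+1), rmf a (m+1))
    cases m with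
    | zero =>
      simp [ansBf, ppf, pvf, rmf, t1f, remf]
    | succ k =>
      have e1 : ((k+1 : Nat) : Int) - 1 = ((k : Nat) : Int) := by push_cast; ring
      rw [e1, PySem.List.pyGetD_natCast a (k+1) (0 : Int), PySem.List.pyGetD_natCast a k (0 : Int)]
      have hno : (if ((k+1:Nat):Int) > 0 ∧ a.getD (k+1) 0 > a.getD k 0 then pvf a (k+1) + 1 else 1)
          = t1f a (k+1) := by
        have hc : (((k+1:Nat):Int) > 0 ∧ a.getD (k+1) 0 > a.getD k 0) ↔ (a.getD k 0 < a.getD (k+1) 0) :=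
          ⟨fun h => h.2, fun h => ⟨by omega, h⟩⟩
        rw [if_congr hc rfl rfl]
        simp only [t1f, pvf]
        norm_num
      have hb1 : (if ((k+1:Nat):Int) ≥ 2 ∧ a.getD (k+1) 0 > PySem.List.pyGetD a (((k+1:Nat):Int) - 2) 0 then ppf a (k+1) + 1 else 0)
          = (if 1 ≤ k ∧ a.getD (k-1) 0 < a.getD (k+1) 0 then t1f a (k-1) + 1 else 0) := by
        cases k with
        | zero => norm_num
        | succ j =>
          have e2 : ((j+2:Nat):Int) - 2 = ((j : Nat) : Int) := by push_cast; ring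
          rw [e2, PySem.List.pyGetD_natCast a j (0:Int)]
          have hc : (((j+2:Nat):Int) ≥ 2 ∧ a.getD (j+2) 0 > a.getD j 0) ↔ (1 ≤ j+1 ∧ a.getD ((j+1)-1) 0 < a.getD ((j+1)+1) 0) := by
            constructor
            · exact fun h => ⟨by omega, by simpa using h.2⟩
            · exact fun h => ⟨by push_cast; omega, by simpa using h.2⟩
          rw [if_congr hc rfl rfl]
          simp [ppf]
      have hrem : (if ((k+1:Nat):Int) ≥ 1 ∧ a.getD (k+1) 0 > a.getD k 0 ∧ rmf a (k+1) > 0 then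
            max (if ((k+1:Nat):Int) ≥ 2 ∧ a.getD (k+1) 0 > PySem.List.pyGetD a (((k+1:Nat):Int) - 2) 0 then ppf a (k+1) + 1 else 0) (rmf a (k+1) + 1)
          else (if ((k+1:Nat):Int) ≥ 2 ∧ a.getD (k+1) 0 > PySem.List.pyGetD a (((k+1:Nat):Int) - 2) 0 then ppf a (k+1) + 1 else 0))
          = remf a (k+1) := by
        rw [hb1]
        have hrm : rmf a (k+1) = remf a k := by simp [rmf]
        rw [hrm]
        have hc2 : (((k+1:Nat):Int) ≥ 1 ∧ a.getD (k+1) 0 > a.getD k 0 ∧ remf a k > 0) ↔ (a.getD k 0 < a.getD (k+1) 0 ∧ remf a k > 0) :=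
          ⟨fun h => h.2, fun h => ⟨by omega, h⟩⟩
        rw [if_congr hc2 rfl rfl]
        have hb1pos : 0 ≤ (if 1 ≤ k ∧ a.getD (k-1) 0 < a.getD (k+1) 0 then t1f a (k-1) + 1 else 0) := by
          split
          · have := t1f_pos a (k-1); omega
          · exact le_refl _
        by_cases hc : a.getD k 0 < a.getD (k+1) 0 ∧ remf a k > 0
        · rw [if_pos hc]
          show _ = max _ _
          rw [if_pos hc]
        · rw [if_neg hc]
          show _ = max _ (if a.getD k 0 < a.getD (k+1) 0 ∧ remf a k > 0 then remf a k + 1 else 0)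
          rw [if_neg hc]
          omega
      rw [hno]
      simp only [hrem]
      refine Prod.ext ?_ (Prod.ext ?_ (Prod.ext ?_ ?_))
      · show max (max (ansBf a (k+1)) (t1f a (k+1))) (remf a (k+1)) = ansBf a (k+2)
        rfl
      · show pvf a (k+1) = ppf a (k+2)
        simp [pvf, ppf]
      · show t1f a (k+1) = pvf a (k+2)
        simp [pvf]
      · show remf a (k+1) = rmf a (k+2)
        simp [rmf]

theorem solve_alt_eq_ansBf (a : List Int) (m : Nat) : solve_alt (m : Int) a = ansBf a m := by
  unfold solve_alt
  rw [B_inv a m]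

-- ===== VERDICT (by name: the statement is the Claim_ definition above) =====
theorem solve_spec : Claim_equal_solve := by
  intro n a _ hpre
  obtain ⟨h1, _⟩ := hpre
  have hn : n = ((n.toNat : Nat) : Int) := by omega
  have hm : 1 ≤ n.toNat := by omega
  unfold Spec_solve
  rw [hn, solve_eq_ansAf a n.toNat hm, solve_alt_eq_ansBf a n.toNat, core a n.toNat hm]
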